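-- pv_equiv track=rewrite | github.com/balhaddad-sys/shifu-ocr | test_arc.py | find_separators
-- ===== SOURCE A (Python) =====
-- from collections import Counter, deque
-- from typing import List, Tuple, Optional, Dict, Set, Callable
--
-- Grid = List[List[int]]
--
-- def dims(g: Grid) -> Tuple[int, int]:
--     return len(g), len(g[0]) if g else 0
--
-- def color_counts(g: Grid) -> Dict[int, int]:
--     ct = Counter()
--     for row in g:
--         for v in row:
--             ct[v] += 1
--     return dict(ct)
--
-- def background(g: Grid) -> int:
--     """Most common color = background."""
--     ct = color_counts(g)
--     return max(ct, key=ct.get)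
--
-- def find_separators(g: Grid) -> Dict:
--     """Find horizontal/vertical separator lines (rows/cols of single color)."""
--     rows, cols = dims(g)
--     result = {'h_seps': [], 'v_seps': []}
--
--     for r in range(rows):
--         vals = set(g[r])
--         if len(vals) == 1 and vals.pop() != background(g):
--             result['h_seps'].append(r)
--
--     for c in range(cols):
--         vals = set(g[r][c] for r in range(rows))
--         if len(vals) == 1 and vals.pop() != background(g):
--             result['v_seps'].append(c)
--
--     return result
-- ===== SOURCE B (Python) =====
-- def find_separators(g):
--     rows = len(g)
--     cols = len(g[0]) if g else 0
--
--     # background computed once (A recomputes it for every candidate line)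
--     counts = {}
--     for row in g:
--         for v in row:
--             counts[v] = counts.get(v, 0) + 1
--     bg = max(counts, key=counts.get) if counts else None
--
--     h_seps = []
--     col_first = []
--     col_uniform = [True] * cols
--     for r in range(rows):
--         row = g[r]
--         if row and all(v == row[0] for v in row) and row[0] != bg:
--             h_seps.append(r)
--         if r == 0:
--             col_first = [g[r][c] for c in range(cols)]
--         else:
--             col_uniform = [u and g[r][c] == col_first[c]
--                            for c, u in enumerate(col_uniform)]
--     v_seps = [c for c, u in enumerate(col_uniform) if u and col_first[c] != bg]
--     return {'h_seps': h_seps, 'v_seps': v_seps}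
-- ===== Notes on version B (the rewrite author's own statement) =====
-- stated objective: faster
-- what changed: B computes the background color once with a hand-built counts dict (A's inner check re-runs Counter-based background(g) for every uniform row/column) and finds horizontal and vertical separators in a single forward pass over the rows, maintaining per-column first-value/uniformity accumulators instead of A's second column-major scan with per-column set building.
import Mathlib
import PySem

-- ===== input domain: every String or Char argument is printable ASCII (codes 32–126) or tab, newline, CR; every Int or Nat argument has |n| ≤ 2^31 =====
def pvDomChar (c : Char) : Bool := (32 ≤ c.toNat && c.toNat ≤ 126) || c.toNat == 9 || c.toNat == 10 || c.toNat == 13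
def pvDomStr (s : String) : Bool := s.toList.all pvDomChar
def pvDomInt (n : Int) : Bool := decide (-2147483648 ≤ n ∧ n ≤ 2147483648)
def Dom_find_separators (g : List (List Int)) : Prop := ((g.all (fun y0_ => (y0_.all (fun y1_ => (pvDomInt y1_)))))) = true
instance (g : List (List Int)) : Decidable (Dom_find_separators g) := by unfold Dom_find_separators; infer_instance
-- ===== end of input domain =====

-- B computes the background once and finds row and column separators in a single forward pass
-- with per-column accumulators, instead of A's two index scans that each recompute the background (objective: faster, constant-factor).


-- ===== PORT A =====
-- color_counts: Counter built row by row, value by value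
def pvColorCounts (g : List (List Int)) : PySem.Dict Int Int :=
  g.foldl (fun ct row => row.foldl (fun ct v => ct.modify v 0 (· + 1)) ct) PySem.Dict.empty

-- background: max(ct, key=ct.get) — first key with maximal count, in insertion order.
-- Python's max raises on an empty dict; A only calls background when the grid has at
-- least one value, so the `.getD 0` default is never reached on those calls.
def pvBackground (g : List (List Int)) : Int :=
  (PySem.List.max? (pvColorCounts g).keys (fun k => (pvColorCounts g).getD k 0)).getD 0

-- find_separators, A's code: dims, then a row scan, then a column scan.
-- `vals.pop()` is executed only when len(vals) == 1, so it is that unique element (ported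
-- as `vals.headD 0` under the `length == 1` conjunct of the short-circuiting `and`).
-- `g[r][c]` is ported with pyGetD; Pre_ excludes the ragged grids where Python raises IndexError.
def find_separators (g : List (List Int)) : List (String × List Int) :=
  let rows := g.length
  let cols := if g.isEmpty then 0 else (g.headD []).length
  let hs := (List.range rows).foldl (fun acc (r : Nat) =>
      let vals : PySem.Set Int := PySem.Set.ofList (g.getD r [])
      if vals.length == 1 && !(vals.headD 0 == pvBackground g) then acc ++ [(r : Int)] else acc) []
  let vs := (List.range cols).foldl (fun acc (c : Nat) =>
      let vals : PySem.Set Int := PySem.Set.ofList ((List.range rows).map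
        (fun (r : Nat) => PySem.List.pyGetD (g.getD r []) (c : Int) 0))
      if vals.length == 1 && !(vals.headD 0 == pvBackground g) then acc ++ [(c : Int)] else acc) []
  [("h_seps", hs), ("v_seps", vs)]

-- ===== PORT B =====
-- Source B's loop body: update h_seps, col_first, col_uniform from row r (named helper for the closure)
def pvAltStep (g : List (List Int)) (bg : Option Int) (cols : Nat)
    (st : List Int × List Int × List Bool) (r : Nat) : List Int × List Int × List Bool :=
  let hs := st.1; let cf := st.2.1; let cu := st.2.2
  let row := g.getD r []
  let hs := if !row.isEmpty && row.all (fun v => v == row.headD 0)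
               && !(some (row.headD 0) == bg) then hs ++ [(r : Int)] else hs
  if r == 0 then
    (hs, (List.range cols).map (fun (c : Nat) => PySem.List.pyGetD (g.getD r []) (c : Int) 0), cu)
  else
    (hs, cf, (PySem.List.enumerate cu).map
      (fun p => p.2 && (PySem.List.pyGetD (g.getD r []) p.1 0 == PySem.List.pyGetD cf p.1 0)))

-- Source B: background computed once from a hand-built counts dict (None if the grid has no
-- values), then ONE pass over the rows maintaining h_seps, col_first and col_uniform.
def find_separators_alt (g : List (List Int)) : List (String × List Int) :=
  let rows := g.length
  let cols := if g.isEmpty then 0 else (g.headD []).length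
  let counts := g.foldl (fun d row => row.foldl
      (fun (d : PySem.Dict Int Int) v => d.insert v (d.getD v 0 + 1)) d) PySem.Dict.empty
  let bg : Option Int := if counts.size == 0 then none
      else some ((PySem.List.max? counts.keys (fun k => counts.getD k 0)).getD 0)
  let st := (List.range rows).foldl (pvAltStep g bg cols) ([], [], List.replicate cols true)
  let vs := ((PySem.List.enumerate st.2.2).filter
      (fun p => p.2 && !(some (PySem.List.pyGetD st.2.1 p.1 0) == bg))).map (fun p => p.1)
  [("h_seps", st.1), ("v_seps", vs)]

-- ===== PRECONDITION & SPEC =====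
-- Pre_ excludes exactly the ragged grids with a row shorter than the first one,
-- on which A's column scan `g[r][c]` raises IndexError.
def Pre_find_separators (g : List (List Int)) : Prop :=
  ∀ row ∈ g, (g.headD []).length ≤ row.length
instance (g : List (List Int)) : Decidable (Pre_find_separators g) := by
  unfold Pre_find_separators; infer_instance

def pvWitness_find_separators : List (List Int) := [[1, 1], [0, 2]]

def Spec_find_separators (g : List (List Int)) (out : List (String × List Int)) : Prop := out = find_separators_alt g
instance (g : List (List Int)) (out : List (String × List Int)) : Decidable (Spec_find_separators g out) := by unfold Spec_find_separators; infer_instance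

-- ===== CLAIM (what is proved, stated in full; the proofs are below) =====
def Claim_equal_find_separators : Prop := ∀ (g : List (List Int)), Dom_find_separators g → Pre_find_separators g → Spec_find_separators g (find_separators g)

-- ===== LEMMAS AND PROOFS =====

-- the value at row r, column c (Python g[r][c]), with pyGetD's defaults outside the grid
abbrev pvColv (g : List (List Int)) (r c : Nat) : Int := PySem.List.pyGetD (g.getD r []) (c : Int) 0

-- B's background option, in the form the proofs use
def pvBg (g : List (List Int)) : Option Int :=
  if g.flatten = [] then none else some (pvBackground g)

-- B's row condition
def pvRowCond (g : List (List Int)) (row : List Int) : Bool :=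
  !row.isEmpty && row.all (fun v => v == row.headD 0) && !(some (row.headD 0) == pvBg g)

-- the counts dict of both ports is Counter(flatten(g))
lemma pvCounts_eq (g : List (List Int)) :
    g.foldl (fun d row => row.foldl
      (fun (d : PySem.Dict Int Int) v => d.insert v (d.getD v 0 + 1)) d) PySem.Dict.empty
    = PySem.Dict.counter g.flatten := by
  rw [← List.foldl_flatten]
  exact PySem.Dict.foldl_insert_getD_add_one_eq_counter _

lemma pvColorCounts_eq (g : List (List Int)) :
    pvColorCounts g = PySem.Dict.counter g.flatten := by
  unfold pvColorCounts
  rw [PySem.Dict.counter_eq_foldl]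
  exact List.foldl_flatten.symm

-- a Python set is a singleton iff the list is nonempty with all elements equal to its head
lemma pvSet_singleton_iff (x : Int) (t : List Int) :
    ((PySem.Set.ofList (x :: t)).length = 1) ↔ (∀ y ∈ t, y = x) := by
  rw [PySem.Set.ofList_cons, List.length_cons]
  have hiff : (PySem.Set.ofList t).discard x = [] ↔ ∀ y ∈ t, y = x := by
    rw [List.eq_nil_iff_forall_not_mem]
    constructor
    · intro h y hy; by_contra hne
      exact h y (by rw [PySem.Set.mem_discard, PySem.Set.mem_ofList]; exact ⟨hy, hne⟩)
    · intro h y hy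
      rw [PySem.Set.mem_discard, PySem.Set.mem_ofList] at hy
      exact hy.2 (h y hy.1)
  rw [← hiff, ← List.length_eq_zero_iff]
  omega

lemma pvSet_headD (x : Int) (t : List Int) (d : Int) :
    (PySem.Set.ofList (x :: t)).headD d = x := by
  rw [PySem.Set.ofList_cons, List.headD_cons]

-- a nonempty row of the grid forces a nonempty flatten
lemma pvFlatten_ne (g : List (List Int)) (row : List Int) (h : row ∈ g) (hne : row ≠ []) :
    g.flatten ≠ [] := by
  intro hf
  rw [List.flatten_eq_nil_iff] at hf
  exact hne (hf row h)

-- A's row condition equals B's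
lemma pvRowCond_eq (g : List (List Int)) (row : List Int) (hmem : row ∈ g) :
    ((PySem.Set.ofList row).length == 1
       && !((PySem.Set.ofList row).headD 0 == pvBackground g))
    = pvRowCond g row := by
  cases row with
  | nil => simp [pvRowCond, PySem.Set.ofList_nil]
  | cons x t =>
    have hbg : pvBg g = some (pvBackground g) := by
      rw [pvBg, if_neg (pvFlatten_ne g (x :: t) hmem (by simp))]
    rw [pvSet_headD, pvRowCond, hbg]
    rw [Bool.eq_iff_iff]
    simp only [Bool.and_eq_true, beq_iff_eq, Bool.not_eq_eq_eq_not, Bool.not_true,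
      List.isEmpty_cons, List.headD_cons, List.all_cons, BEq.rfl,
      Bool.true_and, List.all_eq_true, pvSet_singleton_iff]
    tauto

-- the single-pass state after k rows
lemma pvStateInv (g : List (List Int)) (cols : Nat) (k : Nat) :
    (List.range k).foldl (pvAltStep g (pvBg g) cols) ([], [], List.replicate cols true)
    = (((List.range k).filter (fun r => pvRowCond g (g.getD r []))).map (fun (r : Nat) => (r : Int)),
       (if k = 0 then [] else (List.range cols).map (fun c => pvColv g 0 c)),
       (List.range cols).map (fun c => decide (∀ r < k, 0 < r → pvColv g r c = pvColv g 0 c))) := by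
  induction k with
  | zero =>
    simp only [List.range_zero, List.foldl_nil, List.filter_nil, List.map_nil]
    refine congrArg₂ Prod.mk rfl (congrArg₂ Prod.mk rfl ?_)
    symm
    rw [List.eq_replicate_iff]
    refine ⟨by simp, ?_⟩
    intro b hb
    simp only [List.mem_map] at hb
    obtain ⟨c, _, rfl⟩ := hb
    apply decide_eq_true
    intro r hr
    omega
  | succ k ih =>
    rw [List.range_succ, List.foldl_append, ih, List.foldl_cons, List.foldl_nil]
    simp only [pvAltStep]
    by_cases hk : k = 0
    · subst hk
      simp only [List.range_zero, List.filter_nil, List.map_nil, beq_self_eq_true,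
        List.filter_append, List.map_append, Nat.zero_add]
      refine congrArg₂ Prod.mk ?_ (congrArg₂ Prod.mk (by rw [if_neg Nat.one_ne_zero]) ?_)
      · simp only [List.filter_cons, List.filter_nil]
        change (if pvRowCond g (g.getD 0 []) = true then _ else _) = _
        split_ifs <;> simp
      · apply List.map_congr_left
        intro c _
        rw [decide_eq_decide]
        constructor <;> (intro h r hr hp; omega)
    · have hbeq : (k == 0) = false := by simp [hk]
      simp only [hbeq, Bool.false_eq_true, if_false, if_neg hk, if_neg (Nat.succ_ne_zero k)]
      refine congrArg₂ Prod.mk ?_ (congrArg₂ Prod.mk rfl ?_)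
      · rw [List.filter_append, List.map_append, List.filter_singleton]
        change (if pvRowCond g (g.getD k []) = true then _ else _) = _
        split_ifs with h <;> simp [List.getD] at h <;> simp [h]
      · apply List.ext_getElem
        · simp [PySem.List.length_enumerate]
        · intro i h1 h2
          simp only [List.getElem_map, PySem.List.getElem_enumerate, List.getElem_range,
            List.length_map, List.length_range] at h1 h2 ⊢
          have hi : i < cols := by
            simpa [PySem.List.length_enumerate] using h1
          have hcast : ((0 : Int) + (i : Nat)) = (i : Int) := by omega
          rw [hcast, PySem.List.pyGetD_natCast, PySem.List.pyGetD_natCast,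
            PySem.List.getD_map_range _ _ _ _ hi]
          rw [Bool.beq_eq_decide_eq, ← Bool.decide_and, decide_eq_decide]
          constructor
          · rintro ⟨h, he⟩ r hr hp
            rcases Nat.lt_succ_iff_lt_or_eq.1 hr with h' | rfl
            · exact h r h' hp
            · simpa [pvColv] using he
          · intro h
            refine ⟨fun r hr hp => h r (by omega) hp, ?_⟩
            simpa [pvColv] using h k (by omega) (by omega)

-- A's column condition equals B's final accumulator condition
lemma pvColCond_eq (g : List (List Int)) (c : Nat) (hg : g ≠ []) (hf : g.flatten ≠ []) :
    ((PySem.Set.ofList ((List.range g.length).map (fun r => pvColv g r c))).length == 1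
       && !((PySem.Set.ofList ((List.range g.length).map (fun r => pvColv g r c))).headD 0 == pvBackground g))
    = (decide (∀ r < g.length, 0 < r → pvColv g r c = pvColv g 0 c)
       && !(some (pvColv g 0 c) == pvBg g)) := by
  obtain ⟨m, hm⟩ : ∃ m, g.length = m + 1 := by
    cases g with
    | nil => exact absurd rfl hg
    | cons a t => exact ⟨t.length, rfl⟩
  have hbg : pvBg g = some (pvBackground g) := by rw [pvBg, if_neg hf]
  rw [hbg, hm, List.range_succ_eq_map, List.map_cons, List.map_map, pvSet_headD]
  rw [Bool.eq_iff_iff]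
  simp only [Bool.and_eq_true, beq_iff_eq, Bool.not_eq_eq_eq_not, Bool.not_true,
    decide_eq_true_eq, pvSet_singleton_iff, List.mem_map,
    List.mem_range, Function.comp, forall_exists_index, and_imp]
  constructor
  · rintro ⟨h1, h2⟩
    refine ⟨?_, h2⟩
    intro r hr hp
    have := h1 (pvColv g r c) (r - 1) (by omega)
    rw [Nat.succ_eq_add_one, Nat.sub_add_cancel hp] at this
    exact this rfl
  · rintro ⟨h1, h2⟩
    refine ⟨?_, h2⟩
    intro y r hr hy
    rw [← hy]
    exact h1 (r + 1) (by omega) (by omega)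

-- ===== VERDICT (by name: the statement is the Claim_ definition above) =====
-- B's background expression equals pvBg
lemma pvBgB_eq (g : List (List Int)) :
    (if (PySem.Dict.counter g.flatten).size == 0 then none
     else some ((PySem.List.max? (PySem.Dict.counter g.flatten).keys
       (fun k => (PySem.Dict.counter g.flatten).getD k 0)).getD 0)) = pvBg g := by
  have hsz : (PySem.Dict.counter g.flatten : PySem.Dict Int Int).size
      = (PySem.Set.ofList g.flatten).length := by
    rw [← PySem.Dict.keys_counter]
    simp [PySem.Dict.size, PySem.Dict.keys]
  have hnil : (PySem.Set.ofList g.flatten = []) ↔ g.flatten = [] := by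
    cases hx : g.flatten with
    | nil => simp [PySem.Set.ofList_nil]
    | cons x t => simp [PySem.Set.ofList_cons]
  rw [pvBg, pvBackground, pvColorCounts_eq]
  by_cases hf : g.flatten = []
  · rw [if_pos, if_pos hf]
    rw [hsz]
    simp [hnil.2 hf]
  · rw [if_neg, if_neg hf]
    rw [hsz]
    simp only [beq_iff_eq, List.length_eq_zero_iff]
    intro hcon
    exact hf (hnil.1 hcon)

-- enumerate of a map over range pairs each index with its value
lemma pvEnumerate_map_range {α : Type} (n : Nat) (f : Nat → α) :
    PySem.List.enumerate ((List.range n).map f) 0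
    = (List.range n).map (fun (c : Nat) => ((c : Int), f c)) := by
  apply List.ext_getElem
  · simp [PySem.List.length_enumerate]
  · intro i h1 h2
    simp only [PySem.List.getElem_enumerate, List.getElem_map, List.getElem_range, Int.zero_add]

theorem find_separators_spec : Claim_equal_find_separators := by
  intro g _ _
  unfold Spec_find_separators
  by_cases hg : g = []
  · subst hg; rfl
  · have hlen : g.length ≠ 0 := by simpa [List.length_eq_zero_iff] using hg
    simp only [find_separators, find_separators_alt]
    rw [pvCounts_eq, pvBgB_eq, pvStateInv g _ g.length, if_neg hlen]
    rw [PySem.List.foldl_append_if, PySem.List.foldl_append_if, List.nil_append, List.nil_append]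
    rw [pvEnumerate_map_range, List.filter_map, List.map_map]
    refine congrArg₂ List.cons (congrArg₂ Prod.mk rfl ?_) (congrArg₂ List.cons (congrArg₂ Prod.mk rfl ?_) rfl)
    · -- h_seps
      apply congrArg
      apply List.filter_congr
      intro r hr
      rw [List.mem_range] at hr
      have hmem : g.getD r [] ∈ g := by
        rw [List.getD_eq_getElem _ _ hr]
        exact List.getElem_mem hr
      exact pvRowCond_eq g _ hmem
    · -- v_seps
      set cols := if g.isEmpty then 0 else (g.headD []).length with hcols
      have hrweq : ∀ c ∈ List.range cols,
          ((PySem.Set.ofList ((List.range g.length).map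
              (fun (r : Nat) => PySem.List.pyGetD (g.getD r []) (c : Int) 0))).length == 1
            && !((PySem.Set.ofList ((List.range g.length).map
              (fun (r : Nat) => PySem.List.pyGetD (g.getD r []) (c : Int) 0))).headD 0 == pvBackground g))
          = ((fun p => p.2 && !(some (PySem.List.pyGetD
                ((List.range cols).map (fun c => pvColv g 0 c)) p.1 0) == pvBg g)) ∘
             (fun (c : Nat) => ((c : Int),
                decide (∀ r < g.length, 0 < r → pvColv g r c = pvColv g 0 c)))) c := by
        intro c hc
        rw [List.mem_range] at hc
        have hcolspos : 0 < cols := Nat.pos_of_ne_zero (by omega)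
        have hhead : g.headD [] ∈ g := by
          cases g with
          | nil => exact absurd rfl hg
          | cons a t => exact List.mem_cons_self
        have hhne : g.headD [] ≠ [] := by
          intro hcon
          rw [hcols] at hcolspos
          rw [if_neg (by simpa [List.isEmpty_iff] using hg)] at hcolspos
          rw [hcon] at hcolspos
          simp at hcolspos
        have hf : g.flatten ≠ [] := pvFlatten_ne g _ hhead hhne
        rw [pvColCond_eq g c hg hf]
        simp only [Function.comp]
        rw [PySem.List.pyGetD_natCast, PySem.List.getD_map_range _ _ _ _ hc]
      rw [List.filter_congr hrweq]
      apply List.map_congr_left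
      intro c _
      rfl
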